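-- pv_equiv track=rewrite | github.com/apache/superset | superset/utils/pdf.py | _estimate_column_width_chars
-- ===== SOURCE A (Python) =====
-- MIN_COLUMN_CHARS = 10
--
-- MAX_COLUMN_CHARS = 120
--
-- def _estimate_column_width_chars(
--     columns: list[str], rows: list[dict[str, str]]
-- ) -> list[int]:
--     widths: list[int] = []
--     for column in columns:
--         max_length = len(column)
--         for row in rows:
--             cell_value = row.get(column, "")
--             max_length = max(max_length, len(cell_value))
--         widths.append(min(max(max_length, MIN_COLUMN_CHARS), MAX_COLUMN_CHARS))
--     return widths
-- ===== SOURCE B (Python) =====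
-- MIN_COLUMN_CHARS = 10
--
-- MAX_COLUMN_CHARS = 120
--
--
-- def _estimate_column_width_chars(
--     columns: list[str], rows: list[dict[str, str]]
-- ) -> list[int]:
--     # Row-major single pass: maintain a per-column maxima table keyed by column
--     # name, then clamp once at the end.
--     maxima = {column: len(column) for column in columns}
--     for row in rows:
--         for key, value in row.items():
--             current = maxima.get(key)
--             if current is not None and len(value) > current:
--                 maxima[key] = len(value)
--     return [
--         min(max(maxima[column], MIN_COLUMN_CHARS), MAX_COLUMN_CHARS)
--         for column in columns
--     ]
-- ===== Notes on version B (the rewrite author's own statement) =====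
-- stated objective: faster
-- what changed: Replaces the column-major nested rescans (for each column, scan all rows with dict.get) by one row-major pass that maintains a per-column maxima dict seeded with the header lengths, iterating each row's own items and clamping once at the end.
import Mathlib
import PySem

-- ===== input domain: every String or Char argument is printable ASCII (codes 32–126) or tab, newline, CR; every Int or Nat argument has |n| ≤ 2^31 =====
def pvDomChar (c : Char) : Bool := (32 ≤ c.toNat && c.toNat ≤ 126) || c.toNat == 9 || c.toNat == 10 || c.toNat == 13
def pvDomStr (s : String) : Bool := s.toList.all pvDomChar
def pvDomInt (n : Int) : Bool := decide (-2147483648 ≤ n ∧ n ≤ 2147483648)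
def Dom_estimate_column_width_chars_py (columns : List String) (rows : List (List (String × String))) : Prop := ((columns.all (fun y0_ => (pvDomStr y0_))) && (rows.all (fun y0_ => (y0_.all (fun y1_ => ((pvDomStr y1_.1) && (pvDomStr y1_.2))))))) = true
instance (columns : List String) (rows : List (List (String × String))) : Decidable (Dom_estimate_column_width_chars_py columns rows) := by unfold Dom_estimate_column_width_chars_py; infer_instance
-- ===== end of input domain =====

-- B replaces A's column-major rescans by one row-major pass over a per-column maxima dict (alternative decomposition).

-- ===== PORT A =====
def estimate_column_width_chars_py (columns : List String) (rows : List (List (String × String))) : List Int :=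
  columns.foldl
    (fun widths column =>
      let max_length :=
        rows.foldl
          (fun max_length row =>
            let cell_value := (PySem.Dict.mk row).getD column ""
            max max_length (PySem.Str.len cell_value))
          (PySem.Str.len column)
      widths ++ [min (max max_length 10) 120])
    []

-- ===== PORT B =====
-- maxima = {column: len(column) for column in columns}
def pvMaximaInit (columns : List String) : PySem.Dict String Int :=
  columns.foldl (fun d column => d.insert column (PySem.Str.len column)) PySem.Dict.empty

-- inner loop: for key, value in row.items(): if key in maxima and len(value) > current: update
def pvStep (d : PySem.Dict String Int) (kv : String × String) : PySem.Dict String Int :=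
  match d.get? kv.1 with
  | some current => if PySem.Str.len kv.2 > current then d.insert kv.1 (PySem.Str.len kv.2) else d
  | none => d

def pvMaximaRow (d : PySem.Dict String Int) (row : List (String × String)) : PySem.Dict String Int :=
  row.foldl pvStep d

def estimate_column_width_chars_py_alt (columns : List String) (rows : List (List (String × String))) : List Int :=
  let maxima := rows.foldl pvMaximaRow (pvMaximaInit columns)
  columns.map (fun column => min (max (maxima.getD column 0) 10) 120)

-- ===== PRECONDITION & SPEC =====
-- Pre_ excludes only rows whose association list carries a duplicate key: such a value cannot arise
-- from a Python dict (A's parameter type), and there A's first-match `get` and B's iteration over all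
-- items are both defensible readings that can diverge.
def Pre_estimate_column_width_chars_py (columns : List String) (rows : List (List (String × String))) : Prop :=
  ∀ row ∈ rows, (row.map Prod.fst).Nodup
instance (columns : List String) (rows : List (List (String × String))) : Decidable (Pre_estimate_column_width_chars_py columns rows) := by unfold Pre_estimate_column_width_chars_py; infer_instance

def pvWitness_estimate_column_width_chars_py : List String × (List (List (String × String))) :=
  (["name", "value"], [[("name", "a long enough cell value"), ("value", "x")], [("name", "y")]])

def Spec_estimate_column_width_chars_py (columns : List String) (rows : List (List (String × String))) (out : List Int) : Prop := out = estimate_column_width_chars_py_alt columns rows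
instance (columns : List String) (rows : List (List (String × String))) (out : List Int) : Decidable (Spec_estimate_column_width_chars_py columns rows out) := by unfold Spec_estimate_column_width_chars_py; infer_instance

-- ===== CLAIM (what is proved, stated in full; the proofs are below) =====
def Claim_equal_estimate_column_width_chars_py : Prop := ∀ (columns : List String) (rows : List (List (String × String))), Dom_estimate_column_width_chars_py columns rows → Pre_estimate_column_width_chars_py columns rows → Spec_estimate_column_width_chars_py columns rows (estimate_column_width_chars_py columns rows)

-- ===== LEMMAS AND PROOFS =====

theorem pvStrLen_nonneg (s : String) : 0 ≤ PySem.Str.len s := by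
  simp [PySem.Str.len_eq]

theorem pvMaximaRow_nil (d : PySem.Dict String Int) : pvMaximaRow d [] = d := rfl

theorem pvMaximaRow_cons (d : PySem.Dict String Int) (kv : String × String)
    (rest : List (String × String)) :
    pvMaximaRow d (kv :: rest) = pvMaximaRow (pvStep d kv) rest := rfl

theorem pvStep_get?_ne (d : PySem.Dict String Int) (kv : String × String) (k : String)
    (hk : k ≠ kv.1) : (pvStep d kv).get? k = d.get? k := by
  unfold pvStep
  cases d.get? kv.1 with
  | none => rfl
  | some current =>
    simp only []
    split_ifs with hgt
    · simp [PySem.Dict.get?_insert, hk]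
    · rfl

theorem pvStep_get?_self (d : PySem.Dict String Int) (kv : String × String) (m : Int)
    (h : d.get? kv.1 = some m) :
    (pvStep d kv).get? kv.1 = some (max m (PySem.Str.len kv.2)) := by
  unfold pvStep
  rw [h]
  simp only []
  split_ifs with hgt
  · rw [PySem.Dict.get?_insert_self]
    congr 1
    simp only [PySem.Str.len_eq] at *
    omega
  · rw [h]
    congr 1
    simp only [PySem.Str.len_eq] at *
    omega

-- the seed dict: lookup is the header length for every listed column
theorem pvMaximaInit_get? (columns : List String) (c : String) :
    (pvMaximaInit columns).get? c =
      if c ∈ columns then some (PySem.Str.len c) else none := by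
  unfold pvMaximaInit
  suffices h : ∀ d : PySem.Dict String Int,
      (columns.foldl (fun d column => d.insert column (PySem.Str.len column)) d).get? c =
        if c ∈ columns then some (PySem.Str.len c) else d.get? c by
    simpa using h PySem.Dict.empty
  induction columns with
  | nil => intro d; simp [List.foldl]
  | cons x xs ih =>
    intro d
    simp only [List.foldl_cons, ih, List.mem_cons]
    by_cases hx : c ∈ xs
    · simp [hx]
    · by_cases hcx : c = x
      · subst hcx; simp [hx, PySem.Dict.get?_insert_self]
      · simp [hx, hcx, PySem.Dict.get?_insert]

theorem pvGetD_mk_nil (k : String) : (PySem.Dict.mk ([] : List (String × String))).getD k "" = "" := by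
  rw [PySem.Dict.getD_eq_get?_getD]
  have : (PySem.Dict.mk ([] : List (String × String))).get? k = none := by
    rw [PySem.Dict.get?_eq_none_iff_not_mem_keys]
    simp [PySem.Dict.keys]
  rw [this]
  rfl

-- a row pass updates each existing key to the max with this row's cell length
theorem pvMaximaRow_get?_some (row : List (String × String))
    (hnd : (row.map Prod.fst).Nodup) (d : PySem.Dict String Int) (k : String) (m : Int)
    (hm : 0 ≤ m) (h : d.get? k = some m) :
    (pvMaximaRow d row).get? k =
      some (max m (PySem.Str.len ((PySem.Dict.mk row).getD k ""))) := by
  induction row generalizing d m with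
  | nil =>
    rw [pvMaximaRow_nil, pvGetD_mk_nil, h]
    have : PySem.Str.len "" = 0 := by simp [PySem.Str.len_eq]
    rw [this]
    congr 1; omega
  | cons kv rest ih =>
    obtain ⟨a, v⟩ := kv
    simp only [List.map_cons, List.nodup_cons] at hnd
    obtain ⟨ha, hndr⟩ := hnd
    rw [pvMaximaRow_cons]
    by_cases hk : k = a
    · subst hk
      have hstep : (pvStep d (k, v)).get? k = some (max m (PySem.Str.len v)) :=
        pvStep_get?_self d (k, v) m h
      have hrest := ih hndr _ _ (le_trans hm (le_max_left _ _)) hstep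
      rw [hrest]
      have hnc : (PySem.Dict.mk rest).getD k "" = "" := by
        rw [PySem.Dict.getD_eq_get?_getD]
        have : (PySem.Dict.mk rest).get? k = none := by
          rw [PySem.Dict.get?_eq_none_iff_not_mem_keys]
          simpa [PySem.Dict.keys, PySem.Dict.items] using ha
        rw [this]
        rfl
      have hcell : (PySem.Dict.mk ((k, v) :: rest)).getD k "" = v := by
        rw [PySem.Dict.getD_eq_get?_getD, PySem.Dict.get?_mk_cons]
        simp
      rw [hnc, hcell]
      have h0 : PySem.Str.len "" = 0 := by simp [PySem.Str.len_eq]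
      rw [h0]
      have hv := pvStrLen_nonneg v
      congr 1; omega
    · have hcell : (PySem.Dict.mk ((a, v) :: rest)).getD k "" =
          (PySem.Dict.mk rest).getD k "" := by
        rw [PySem.Dict.getD_eq_get?_getD, PySem.Dict.get?_mk_cons,
          if_neg (by simp only [beq_iff_eq]; exact fun hak => hk hak.symm),
          ← PySem.Dict.getD_eq_get?_getD]
      rw [hcell]
      exact ih hndr _ m hm ((pvStep_get?_ne d (a, v) k hk).trans h)

-- the whole row-major fold computes A's inner column-major fold, per column
theorem pvMaxima_fold_get? (rows : List (List (String × String)))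
    (hnd : ∀ row ∈ rows, (row.map Prod.fst).Nodup)
    (d : PySem.Dict String Int) (k : String) (m : Int) (hm : 0 ≤ m)
    (h : d.get? k = some m) :
    (rows.foldl pvMaximaRow d).get? k =
      some (rows.foldl
        (fun acc row => max acc (PySem.Str.len ((PySem.Dict.mk row).getD k ""))) m) := by
  induction rows generalizing d m with
  | nil => simpa using h
  | cons row rest ih =>
    simp only [List.foldl_cons]
    exact ih (fun r hr => hnd r (List.mem_cons_of_mem _ hr)) _ _
      (le_trans hm (le_max_left _ _))
      (pvMaximaRow_get?_some row (hnd row (List.mem_cons_self)) d k m hm h)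

-- ===== VERDICT (by name: the statement is the Claim_ definition above) =====
theorem estimate_column_width_chars_py_spec : Claim_equal_estimate_column_width_chars_py := by
  intro columns rows _ hpre
  unfold Spec_estimate_column_width_chars_py
  unfold estimate_column_width_chars_py estimate_column_width_chars_py_alt
  rw [PySem.List.foldl_append_singleton_eq_map]
  simp only [List.nil_append]
  apply List.map_congr_left
  intro c hc
  have hinit : (pvMaximaInit columns).get? c = some (PySem.Str.len c) := by
    rw [pvMaximaInit_get?]; simp [hc]
  have hfold := pvMaxima_fold_get? rows hpre (pvMaximaInit columns) c (PySem.Str.len c)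
    (pvStrLen_nonneg c) hinit
  rw [PySem.Dict.getD_eq_get?_getD, hfold]
  rfl
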